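-- pv_equiv track=rewrite | github.com/ziqun-liu/TIP103-3 | week2/week2_session1_problem7.py | min_steps_to_match_maps
-- ===== SOURCE A (Python) =====
-- def min_steps_to_match_maps(map1, map2):
--     """
--     U:
--         - input string
--         - output int
--     M:
--         - hashmap
--     P:
--         - get frequency of every char
--         - convert one map to the other, count number of steps
--     """
--     hmap1 = {}; hmap2 = {};
--     for ch in map1:
--         hmap1[ch] = hmap1.get(ch, 0) + 1
--     for ch in map2:
--         hmap2[ch] = hmap2.get(ch, 0) + 1
--
--     res = 0
--     for ch in hmap1:
--         res += max(0, hmap1[ch] - hmap2.get(ch, 0))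
--
--     return res
-- ===== SOURCE B (Python) =====
-- def min_steps_to_match_maps(map1, map2):
--     # One-pass greedy: count chars of map2 once, then scan map1 consuming
--     # available chars; every char of map1 with no available partner needs a step.
--     avail = {}
--     for ch in map2:
--         avail[ch] = avail.get(ch, 0) + 1
--     matched = 0
--     for ch in map1:
--         if avail.get(ch, 0) > 0:
--             avail[ch] -= 1
--             matched += 1
--     return len(map1) - matched
-- ===== Notes on version B (the rewrite author's own statement) =====
-- stated objective: alternative
-- what changed: A builds frequency maps of both strings and sums the one-sided positive surpluses over map1's keys; B scans map1 once, greedily consuming a counter of map2's characters, and returns len(map1) minus the number of matched characters.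
import Mathlib
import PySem

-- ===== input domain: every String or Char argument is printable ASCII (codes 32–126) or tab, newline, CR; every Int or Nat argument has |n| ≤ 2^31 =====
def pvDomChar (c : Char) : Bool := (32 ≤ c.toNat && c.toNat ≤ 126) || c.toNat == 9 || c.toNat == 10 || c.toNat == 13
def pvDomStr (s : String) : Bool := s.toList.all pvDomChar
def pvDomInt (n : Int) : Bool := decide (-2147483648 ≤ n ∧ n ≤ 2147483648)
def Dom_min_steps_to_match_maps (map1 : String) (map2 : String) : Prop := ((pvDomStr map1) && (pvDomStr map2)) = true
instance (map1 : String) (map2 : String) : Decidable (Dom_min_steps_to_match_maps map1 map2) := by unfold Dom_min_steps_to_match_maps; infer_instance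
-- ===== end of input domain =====

-- B replaces A's two-frequency-map surplus sum with a one-pass greedy match against a counter of map2 (alternative decomposition, same cost).


-- ===== PORT A =====
-- hmap1[ch] in the final loop is total (ch ranges over hmap1's keys), so it is ported as getD.
def min_steps_to_match_maps (map1 : String) (map2 : String) : Int :=
  let hmap1 := map1.toList.foldl (fun d ch => d.insert ch (d.getD ch 0 + 1)) PySem.Dict.empty
  let hmap2 := map2.toList.foldl (fun d ch => d.insert ch (d.getD ch 0 + 1)) PySem.Dict.empty
  hmap1.keys.foldl (fun res ch => res + max 0 (hmap1.getD ch 0 - hmap2.getD ch 0)) 0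

-- ===== PORT B =====
def pvMatchLoop (l : List Char) (avail : PySem.Dict Char Int) (matched : Int) : Int :=
  match l with
  | [] => matched
  | ch :: rest =>
      if avail.getD ch 0 > 0 then
        pvMatchLoop rest (avail.insert ch (avail.getD ch 0 - 1)) (matched + 1)
      else
        pvMatchLoop rest avail matched

def min_steps_to_match_maps_alt (map1 : String) (map2 : String) : Int :=
  let avail := map2.toList.foldl (fun d ch => d.insert ch (d.getD ch 0 + 1)) PySem.Dict.empty
  PySem.Str.len map1 - pvMatchLoop map1.toList avail 0

-- ===== PRECONDITION & SPEC =====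
def Spec_min_steps_to_match_maps (map1 : String) (map2 : String) (out : Int) : Prop := out = min_steps_to_match_maps_alt map1 map2
instance (map1 : String) (map2 : String) (out : Int) : Decidable (Spec_min_steps_to_match_maps map1 map2 out) := by unfold Spec_min_steps_to_match_maps; infer_instance

-- ===== CLAIM (what is proved, stated in full; the proofs are below) =====
def Claim_equal_min_steps_to_match_maps : Prop := ∀ (map1 : String) (map2 : String), Dom_min_steps_to_match_maps map1 map2 → Spec_min_steps_to_match_maps map1 map2 (min_steps_to_match_maps map1 map2)

-- ===== LEMMAS AND PROOFS =====

-- B's greedy loop counts matches: matched grows by Σ_d min(count of d in l, available d).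
theorem pvMatchLoop_eq (l : List Char) (avail : PySem.Dict Char Int) (matched : Int)
    (h : ∀ d, 0 ≤ avail.getD d 0) :
    pvMatchLoop l avail matched
      = matched + ∑ d ∈ l.toFinset, min (l.count d : Int) (avail.getD d 0) := by
  induction l generalizing avail matched with
  | nil => simp [pvMatchLoop]
  | cons ch rest ih =>
    by_cases hpos : avail.getD ch 0 > 0
    · have h' : ∀ d, 0 ≤ (avail.insert ch (avail.getD ch 0 - 1)).getD d 0 := by
        intro d
        rw [PySem.Dict.getD_insert]
        split_ifs with hd
        · omega
        · exact h d
      rw [pvMatchLoop, if_pos hpos, ih _ _ h']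
      by_cases hmem : ch ∈ rest.toFinset
      · rw [List.toFinset_cons, Finset.insert_eq_self.mpr hmem]
        rw [← Finset.add_sum_erase _ _ hmem, ← Finset.add_sum_erase _ _ hmem]
        have hrest : ∑ d ∈ rest.toFinset.erase ch,
              min ((ch :: rest).count d : Int) (avail.getD d 0)
            = ∑ d ∈ rest.toFinset.erase ch,
              min (rest.count d : Int) ((avail.insert ch (avail.getD ch 0 - 1)).getD d 0) := by
          refine Finset.sum_congr rfl fun d hd => ?_
          have hne : d ≠ ch := (Finset.mem_erase.mp hd).1
          simp [hne, hne.symm, PySem.Dict.getD_insert]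
        rw [hrest]
        simp only [List.count_cons_self, PySem.Dict.getD_insert_self]
        omega
      · rw [List.toFinset_cons, Finset.sum_insert hmem]
        have hcnt : rest.count ch = 0 := List.count_eq_zero.mpr (by simpa using hmem)
        have hrest : ∑ d ∈ rest.toFinset,
              min ((ch :: rest).count d : Int) (avail.getD d 0)
            = ∑ d ∈ rest.toFinset,
              min (rest.count d : Int) ((avail.insert ch (avail.getD ch 0 - 1)).getD d 0) := by
          refine Finset.sum_congr rfl fun d hd => ?_
          have hne : d ≠ ch := by rintro rfl; exact hmem hd
          simp [hne, hne.symm, PySem.Dict.getD_insert]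
        rw [hrest]
        simp only [List.count_cons_self, hcnt]
        omega
    · rw [pvMatchLoop, if_neg hpos, ih _ _ h]
      have ha : avail.getD ch 0 = 0 := le_antisymm (by omega) (h ch)
      by_cases hmem : ch ∈ rest.toFinset
      · rw [List.toFinset_cons, Finset.insert_eq_self.mpr hmem]
        rw [← Finset.add_sum_erase _ _ hmem, ← Finset.add_sum_erase _ _ hmem]
        have hrest : ∑ d ∈ rest.toFinset.erase ch,
              min ((ch :: rest).count d : Int) (avail.getD d 0)
            = ∑ d ∈ rest.toFinset.erase ch,
              min (rest.count d : Int) (avail.getD d 0) := by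
          refine Finset.sum_congr rfl fun d hd => ?_
          simp [Ne.symm (Finset.mem_erase.mp hd).1]
        rw [hrest]
        simp only [List.count_cons_self, ha]
        omega
      · rw [List.toFinset_cons, Finset.sum_insert hmem]
        have hrest : ∑ d ∈ rest.toFinset,
              min ((ch :: rest).count d : Int) (avail.getD d 0)
            = ∑ d ∈ rest.toFinset,
              min (rest.count d : Int) (avail.getD d 0) := by
          refine Finset.sum_congr rfl fun d hd => ?_
          have hne : d ≠ ch := by rintro rfl; exact hmem hd
          simp [hne.symm]
        rw [hrest]
        simp only [List.count_cons_self, ha]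
        omega

-- ===== VERDICT (by name: the statement is the Claim_ definition above) =====
theorem min_steps_to_match_maps_spec : Claim_equal_min_steps_to_match_maps := by
  intro map1 map2 _
  unfold Spec_min_steps_to_match_maps min_steps_to_match_maps min_steps_to_match_maps_alt
  simp only [PySem.Dict.foldl_insert_getD_add_one_eq_counter]
  rw [pvMatchLoop_eq _ _ _ (fun d => by rw [PySem.Dict.getD_counter]; positivity),
      PySem.List.foldl_add, PySem.Dict.keys_counter,
      ← List.sum_toFinset _ (PySem.Set.nodup_ofList _)]
  have hfs : (PySem.Set.ofList map1.toList).toFinset = map1.toList.toFinset := by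
    ext d; simp [PySem.Set.mem_ofList]
  have hlen : PySem.Str.len map1
      = ∑ d ∈ map1.toList.toFinset, (map1.toList.count d : Int) := by
    rw [PySem.Str.len_eq, ← List.sum_toFinset_count_eq_length map1.toList]
    push_cast
    rfl
  rw [hfs, hlen]
  simp only [PySem.Dict.getD_counter, zero_add]
  rw [← Finset.sum_sub_distrib]
  exact Finset.sum_congr rfl fun d _ => by omega
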